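-- pv_equiv track=rewrite | github.com/SSTF-Office/SamsungCTF | 2017_SCTF/Quals/coding/Turing_Competition/src/TCs.py | chk3
-- ===== SOURCE A (Python) =====
-- def chk3(x):
--     is_zero = True
--     v = 0
--     for i in x:
--         if is_zero:
--             if i == '0':
--                 v += 1
--                 continue
--             else:
--                 v -= 1
--                 is_zero = False
--         else:
--             if i == '1':
--                 v -= 1
--                 continue
--             else:
--                 return False
--     return v == 0
-- ===== SOURCE B (Python) =====
-- def chk3(x):
--     stripped = x.lstrip('0')
--     zeros = len(x) - len(stripped)
--     if not stripped:
--         return zeros == 0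
--     rest = stripped[1:]
--     for c in rest:
--         if c != '1':
--             return False
--     return zeros == len(rest) + 1
-- ===== Notes on version B (the rewrite author's own statement) =====
-- stated objective: simpler
-- what changed: B locates the zero/non-zero boundary with lstrip('0'), drops the single transition character, checks the tail is all '1's and compares counts, instead of threading an is_zero flag and a running counter v through one fused state-machine loop.
import Mathlib
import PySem

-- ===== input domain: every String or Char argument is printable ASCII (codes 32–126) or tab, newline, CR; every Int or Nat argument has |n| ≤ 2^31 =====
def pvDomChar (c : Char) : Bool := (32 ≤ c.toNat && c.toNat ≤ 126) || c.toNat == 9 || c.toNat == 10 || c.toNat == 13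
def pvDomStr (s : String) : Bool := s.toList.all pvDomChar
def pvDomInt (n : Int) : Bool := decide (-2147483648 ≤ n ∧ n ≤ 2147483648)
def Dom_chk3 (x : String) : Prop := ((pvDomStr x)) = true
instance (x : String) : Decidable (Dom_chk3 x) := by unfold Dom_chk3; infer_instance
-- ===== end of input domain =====

-- B replaces A's fused is_zero/v state-machine loop by lstrip-based decomposition (objective: simpler).

-- ===== PORT A =====
-- the for-loop over characters with state (is_zero, v); an early `return False` ends the recursion
def chk3Loop : List Char → Bool → Int → Bool
  | [], _, v => v == 0
  | c :: rest, true, v =>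
      if c = '0' then chk3Loop rest true (v + 1)
      else chk3Loop rest false (v - 1)
  | c :: rest, false, v =>
      if c = '1' then chk3Loop rest false (v - 1)
      else false

def chk3 (x : String) : Bool := chk3Loop x.toList true 0

-- ===== PORT B =====
def chk3_alt (x : String) : Bool :=
  let l := x.toList
  let stripped := l.dropWhile (fun c => c = '0')   -- x.lstrip('0')
  let zeros : Int := (l.length : Int) - stripped.length
  match stripped with
  | [] => zeros == 0
  | _ :: rest =>                                    -- rest = stripped[1:]
      rest.all (fun c => c = '1') && (zeros == (rest.length : Int) + 1)

-- ===== PRECONDITION & SPEC =====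
def Spec_chk3 (x : String) (out : Bool) : Prop := out = chk3_alt x
instance (x : String) (out : Bool) : Decidable (Spec_chk3 x out) := by unfold Spec_chk3; infer_instance

-- ===== CLAIM (what is proved, stated in full; the proofs are below) =====
def Claim_equal_chk3 : Prop := ∀ (x : String), Dom_chk3 x → Spec_chk3 x (chk3 x)

-- ===== LEMMAS AND PROOFS =====

theorem pvBeqCongr (x y z w : Int) (h : (x = y) ↔ (z = w)) : ((x == y) : Bool) = (z == w) := by
  by_cases hx : x = y <;> by_cases hz : z = w <;> simp_all

theorem pvBandBeqCongr (a : Bool) (x y z w : Int) (h : (x = y) ↔ (z = w)) :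
    (a && (x == y)) = (a && (z == w)) := by
  cases a <;> simp [pvBeqCongr x y z w h]

theorem chk3Loop_false (l : List Char) : ∀ v : Int,
    chk3Loop l false v = (l.all (fun c => c = '1') && (v == (l.length : Int))) := by
  induction l with
  | nil => intro v; simp [chk3Loop]
  | cons c rest ih =>
    intro v
    by_cases h : c = '1'
    · rw [show chk3Loop (c :: rest) false v = chk3Loop rest false (v - 1) by simp [chk3Loop, h]]
      rw [ih (v - 1)]
      simp only [List.all_cons, h, decide_true, Bool.true_and, List.length_cons]
      exact pvBandBeqCongr _ _ _ _ _ (by push_cast; omega)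
    · simp [chk3Loop, h]

theorem chk3Loop_true (l : List Char) : ∀ v : Int,
    chk3Loop l true v =
      (match l.dropWhile (fun c => c = '0') with
       | [] => (v + (l.length : Int) == 0)
       | _ :: rest =>
           rest.all (fun c => c = '1') &&
             (v + ((l.length : Int) - ((l.dropWhile (fun c => c = '0')).length : Int))
               == (rest.length : Int) + 1)) := by
  induction l with
  | nil => intro v; simp [chk3Loop]
  | cons c rest ih =>
    intro v
    by_cases h : c = '0'
    · rw [show chk3Loop (c :: rest) true v = chk3Loop rest true (v + 1) by simp [chk3Loop, h]]
      rw [ih (v + 1)]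
      simp only [List.dropWhile, h, decide_true, List.length_cons]
      cases hd : rest.dropWhile (fun c => c = '0') with
      | nil =>
        exact pvBeqCongr _ _ _ _ (by push_cast; omega)
      | cons a b =>
        simp only [List.length_cons]
        exact pvBandBeqCongr _ _ _ _ _ (by push_cast; omega)
    · rw [show chk3Loop (c :: rest) true v = chk3Loop rest false (v - 1) by simp [chk3Loop, h]]
      rw [chk3Loop_false]
      simp only [List.dropWhile, h, decide_false, List.length_cons]
      exact pvBandBeqCongr _ _ _ _ _ (by push_cast; omega)

-- ===== VERDICT (by name: the statement is the Claim_ definition above) =====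
theorem chk3_spec : Claim_equal_chk3 := by
  intro x _
  unfold Spec_chk3 chk3 chk3_alt
  rw [chk3Loop_true]
  cases hd : x.toList.dropWhile (fun c => c = '0') with
  | nil => simp [hd]
  | cons a b =>
    simp only [hd]
    exact pvBandBeqCongr _ _ _ _ _ (by push_cast; omega)
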